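-- pv_equiv track=rewrite | github.com/yushims/trans_refine | common.py | preserve_terminal_punctuation
-- ===== SOURCE A (Python) =====
-- import unicodedata
--
-- def _terminal_punctuation_char(text: str) -> str:
--     if not isinstance(text, str):
--         return ""
--     trimmed = text.rstrip()
--     if not trimmed:
--         return ""
--     tail = trimmed[-1]
--     return tail if unicodedata.category(tail).startswith("P") else ""
--
-- def _contains_any_punctuation(text: str) -> bool:
--     if not isinstance(text, str) or not text:
--         return False
--     return any(unicodedata.category(char).startswith("P") for char in text)
--
-- def preserve_terminal_punctuation(corrected_text: str, source_text: str) -> tuple[str, bool]: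
--     if not isinstance(corrected_text, str) or not isinstance(source_text, str):
--         return corrected_text, False
--
--     # Do not force terminal punctuation parity for punctuation-free inputs.
--     if not _contains_any_punctuation(source_text):
--         return corrected_text, False
--
--     source_trimmed = source_text.rstrip()
--     corrected_trimmed = corrected_text.rstrip()
--     if not source_trimmed or not corrected_trimmed:
--         return corrected_text, False
--
--     source_terminal = _terminal_punctuation_char(source_text)
--     corrected_terminal = _terminal_punctuation_char(corrected_text)
--     source_has_terminal = bool(source_terminal)
--     corrected_has_terminal = bool(corrected_terminal)
--
--     if source_has_terminal != corrected_has_terminal: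
--         corrected_trailing_len = len(corrected_text) - len(corrected_trimmed)
--         corrected_trailing = corrected_text[-corrected_trailing_len:] if corrected_trailing_len > 0 else ""
--
--         corrected_base = corrected_trimmed
--         while corrected_base and unicodedata.category(corrected_base[-1]).startswith("P"):
--             corrected_base = corrected_base[:-1]
--
--         replacement = corrected_base + (source_terminal if source_has_terminal else "")
--         if replacement != corrected_trimmed:
--             return replacement + corrected_trailing, True
--         return corrected_text, False
--
--     if source_terminal == corrected_terminal:
--         return corrected_text, False
--
--     corrected_trailing_len = len(corrected_text) - len(corrected_trimmed)
--     corrected_trailing = corrected_text[-corrected_trailing_len:] if corrected_trailing_len > 0 else ""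
--
--     base = corrected_trimmed
--     while base and unicodedata.category(base[-1]).startswith("P"):
--         base = base[:-1]
--
--     replacement = base + source_terminal if source_terminal else base
--     return replacement + corrected_trailing, True
-- ===== SOURCE B (Python) =====
-- import unicodedata
--
--
-- def _is_punct(char: str) -> bool:
--     return unicodedata.category(char).startswith("P")
--
--
-- def preserve_terminal_punctuation(corrected_text: str, source_text: str) -> tuple[str, bool]:
--     if not isinstance(corrected_text, str) or not isinstance(source_text, str):
--         return corrected_text, False
--
--     # Do not force terminal punctuation parity for punctuation-free inputs.
--     if not any(_is_punct(char) for char in source_text):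
--         return corrected_text, False
--
--     source_trimmed = source_text.rstrip()
--     corrected_trimmed = corrected_text.rstrip()
--     if not source_trimmed or not corrected_trimmed:
--         return corrected_text, False
--
--     source_terminal = source_trimmed[-1] if _is_punct(source_trimmed[-1]) else ""
--     corrected_terminal = corrected_trimmed[-1] if _is_punct(corrected_trimmed[-1]) else ""
--     if source_terminal == corrected_terminal:
--         return corrected_text, False
--
--     trailing = corrected_text[len(corrected_trimmed):]
--     k = len(corrected_trimmed)
--     while k and _is_punct(corrected_trimmed[k - 1]):
--         k -= 1
--     return corrected_trimmed[:k] + source_terminal + trailing, True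
-- ===== Notes on version B (the rewrite author's own statement) =====
-- stated objective: simpler
-- what changed: Collapses A's two mirrored fix-up branches (the has-terminal-parity branch and the different-terminal branch, each with its own trailing-slice computation and strip-punctuation while loop over string slices) into one single-exit path: compare the two terminal characters directly and, when they differ, strip trailing punctuation with an index-countdown loop and append the source terminal once.
import Mathlib
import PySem

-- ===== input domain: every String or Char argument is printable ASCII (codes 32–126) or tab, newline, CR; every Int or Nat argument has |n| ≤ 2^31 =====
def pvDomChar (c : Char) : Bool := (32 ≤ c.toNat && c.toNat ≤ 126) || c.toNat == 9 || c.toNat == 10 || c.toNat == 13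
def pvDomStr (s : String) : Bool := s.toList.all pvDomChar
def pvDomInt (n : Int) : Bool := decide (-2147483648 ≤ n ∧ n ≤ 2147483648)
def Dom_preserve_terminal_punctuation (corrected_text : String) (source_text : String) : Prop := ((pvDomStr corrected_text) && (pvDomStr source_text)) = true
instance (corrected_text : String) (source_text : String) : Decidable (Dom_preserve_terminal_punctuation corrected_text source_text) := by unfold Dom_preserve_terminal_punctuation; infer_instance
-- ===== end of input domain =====

-- B is a single-exit decomposition: the two mirrored "fix it up" branches of A collapse into one
-- (compare the two terminal characters directly); same return value on the whole ASCII domain.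

-- unicodedata.category(c).startswith("P") — exact on the printable-ASCII + tab/newline/CR domain
def pvIsPunct (c : Char) : Bool :=
  ['!', '"', '#', '%', '&', '\'', '(', ')', '*', ',', '-', '.', '/',
   ':', ';', '?', '@', '[', '\\', ']', '_', '{', '}'].contains c

-- ===== PORT A =====

-- _contains_any_punctuation: the 'not text' guard returns False, which any over [] also gives
def pvContainsPunct (text : List Char) : Bool := text.any pvIsPunct

-- _terminal_punctuation_char (isinstance guard always true for a String argument)
def pvTermChar (text : List Char) : List Char :=
  let trimmed := PySem.Chars.rstrip text
  match trimmed.getLast? with          -- 'if not trimmed: return ""' + tail = trimmed[-1]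
  | none => []
  | some tail => if pvIsPunct tail then [tail] else []

-- the while loop: while corrected_base and P(corrected_base[-1]): corrected_base = corrected_base[:-1]
def pvStripPunctA (l : List Char) : List Char :=
  if _h : l ≠ [] ∧ pvIsPunct (l.getLastD ' ') = true then pvStripPunctA l.dropLast else l
termination_by l.length
decreasing_by
  have hne : l ≠ [] := _h.1
  cases l with
  | nil => exact absurd rfl hne
  | cons a as => simp

def preserve_terminal_punctuation (corrected_text : String) (source_text : String) : String × Bool :=
  let cl := corrected_text.toList
  let sl := source_text.toList
  -- isinstance guards: always true for String arguments
  if !(pvContainsPunct sl) then (corrected_text, false)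
  else
    let source_trimmed := PySem.Chars.rstrip sl
    let corrected_trimmed := PySem.Chars.rstrip cl
    if source_trimmed = [] ∨ corrected_trimmed = [] then (corrected_text, false)
    else
      let source_terminal := pvTermChar sl
      let corrected_terminal := pvTermChar cl
      let source_has := !source_terminal.isEmpty
      let corrected_has := !corrected_terminal.isEmpty
      if source_has ≠ corrected_has then
        let trailing_len := cl.length - corrected_trimmed.length
        let corrected_trailing :=
          if 0 < trailing_len then PySem.List.slice cl (some (-(trailing_len : Int))) none else []
        let corrected_base := pvStripPunctA corrected_trimmed
        let replacement := corrected_base ++ (if source_has then source_terminal else [])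
        if replacement ≠ corrected_trimmed then (String.ofList (replacement ++ corrected_trailing), true)
        else (corrected_text, false)
      else if source_terminal = corrected_terminal then (corrected_text, false)
      else
        let trailing_len := cl.length - corrected_trimmed.length
        let corrected_trailing :=
          if 0 < trailing_len then PySem.List.slice cl (some (-(trailing_len : Int))) none else []
        let base := pvStripPunctA corrected_trimmed
        let replacement := if !source_terminal.isEmpty then base ++ source_terminal else base
        (String.ofList (replacement ++ corrected_trailing), true)

-- ===== PORT B =====

-- the index loop: k = len(t); while k and _is_punct(t[k-1]): k -= 1
def pvStripLen (l : List Char) : Nat → Nat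
  | 0 => 0
  | k + 1 => if pvIsPunct (l.getD k ' ') then pvStripLen l k else k + 1

def preserve_terminal_punctuation_alt (corrected_text : String) (source_text : String) : String × Bool :=
  let cl := corrected_text.toList
  let sl := source_text.toList
  if !(sl.any pvIsPunct) then (corrected_text, false)
  else
    let source_trimmed := PySem.Chars.rstrip sl
    let corrected_trimmed := PySem.Chars.rstrip cl
    if source_trimmed = [] ∨ corrected_trimmed = [] then (corrected_text, false)
    else
      -- t[-1] on the (nonempty) trimmed strings
      let source_terminal :=
        match source_trimmed.getLast? with
        | some c => if pvIsPunct c then [c] else []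
        | none => []
      let corrected_terminal :=
        match corrected_trimmed.getLast? with
        | some c => if pvIsPunct c then [c] else []
        | none => []
      if source_terminal = corrected_terminal then (corrected_text, false)
      else
        let trailing := cl.drop corrected_trimmed.length
        (String.ofList (corrected_trimmed.take (pvStripLen corrected_trimmed corrected_trimmed.length)
                     ++ source_terminal ++ trailing), true)

-- ===== PRECONDITION & SPEC =====
def Spec_preserve_terminal_punctuation (corrected_text : String) (source_text : String) (out : String × Bool) : Prop := out = preserve_terminal_punctuation_alt corrected_text source_text
instance (corrected_text : String) (source_text : String) (out : String × Bool) : Decidable (Spec_preserve_terminal_punctuation corrected_text source_text out) := by unfold Spec_preserve_terminal_punctuation; infer_instance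

-- ===== CLAIM (what is proved, stated in full; the proofs are below) =====
def Claim_equal_preserve_terminal_punctuation : Prop := ∀ (corrected_text : String) (source_text : String), Dom_preserve_terminal_punctuation corrected_text source_text → Spec_preserve_terminal_punctuation corrected_text source_text (preserve_terminal_punctuation corrected_text source_text)

-- ===== LEMMAS AND PROOFS =====

theorem pvStripPunctA_rev (r : List Char) :
    pvStripPunctA r.reverse = (List.dropWhile pvIsPunct r).reverse := by
  induction r with
  | nil => simp [pvStripPunctA]
  | cons c r ih =>
    rw [List.reverse_cons, pvStripPunctA]
    by_cases h : pvIsPunct c = true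
    · rw [dif_pos ⟨by simp, by simp [h]⟩, List.dropLast_concat, ih]
      simp [h]
    · rw [dif_neg (by rintro ⟨-, hP⟩; rw [List.getLastD_concat] at hP; exact h hP)]
      simp [h]

theorem pvStripPunctA_eq (l : List Char) :
    pvStripPunctA l = (List.dropWhile pvIsPunct l.reverse).reverse := by
  have := pvStripPunctA_rev l.reverse
  simpa using this

theorem pvStripLen_le (l : List Char) (k : Nat) : pvStripLen l k ≤ k := by
  induction k with
  | zero => simp [pvStripLen]
  | succ k ih =>
    simp only [pvStripLen]
    split <;> omega

theorem pvStripLen_append (l t : List Char) (k : Nat) (h : k ≤ l.length) :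
    pvStripLen (l ++ t) k = pvStripLen l k := by
  induction k with
  | zero => rfl
  | succ k ih =>
    simp only [pvStripLen, List.getD, List.getElem?_append_left (by omega : k < l.length)]
    rw [ih (by omega)]
    rfl


theorem pvStripLen_rev (r : List Char) :
    r.reverse.take (pvStripLen r.reverse r.reverse.length) = (List.dropWhile pvIsPunct r).reverse := by
  induction r with
  | nil => rfl
  | cons c r ih =>
    rw [List.reverse_cons]
    have hlen : (r.reverse ++ [c]).length = r.reverse.length + 1 := by simp
    rw [hlen]
    simp only [pvStripLen, List.getD, List.getElem?_concat_length, Option.getD_some,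
      List.dropWhile_cons]
    by_cases h : pvIsPunct c = true
    · rw [if_pos h, if_pos h, pvStripLen_append _ _ _ (le_refl _),
        List.take_append_of_le_length (pvStripLen_le _ _), ih]
    · rw [if_neg h, if_neg h, List.take_of_length_le (by simp)]
      simp

theorem pvStripLen_take (l : List Char) :
    l.take (pvStripLen l l.length) = pvStripPunctA l := by
  have := pvStripLen_rev l.reverse
  rw [pvStripPunctA_eq]
  simpa using this

theorem pv_rstrip_len_le (l : List Char) : (PySem.Chars.rstrip l).length ≤ l.length := by
  simp only [PySem.Chars.rstrip, List.length_reverse]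
  have := List.length_dropWhile_le (p := PySem.Chars.isspace) (l := l.reverse)
  simpa using this

theorem pv_trailing_eq (l : List Char) :
    (if 0 < l.length - (PySem.Chars.rstrip l).length
     then PySem.List.slice l (some (-((l.length - (PySem.Chars.rstrip l).length : Nat) : Int))) none
     else []) = l.drop (PySem.Chars.rstrip l).length := by
  have hle := pv_rstrip_len_le l
  by_cases h : 0 < l.length - (PySem.Chars.rstrip l).length
  · rw [if_pos h, PySem.List.slice_from_neg_natCast _ _ h]
    congr 1
    omega
  · rw [if_neg h, eq_comm, List.drop_eq_nil_iff]
    omega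

-- the stripped trimmed text is strictly shorter when the text ends in punctuation
theorem pvStripPunctA_ne (l : List Char) (c : Char) (h : l.getLast? = some c)
    (hp : pvIsPunct c = true) : pvStripPunctA l ≠ l := by
  rw [pvStripPunctA_eq]
  have hrev : l.reverse.head? = some c := by rw [List.head?_reverse, h]
  intro heq
  have hlen := congrArg List.length heq
  cases hl : l.reverse with
  | nil => rw [hl] at hrev; simp at hrev
  | cons x xs =>
    rw [hl] at hrev
    simp only [List.head?_cons, Option.some.injEq] at hrev
    subst hrev
    rw [hl, List.dropWhile_cons, hp, if_pos rfl] at hlen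
    simp only [List.length_reverse] at hlen
    have h1 := List.length_dropWhile_le (p := pvIsPunct) (l := xs)
    have h2 : l.length = xs.length + 1 := by
      have := congrArg List.length hl
      simpa using this
    omega

-- and unchanged when it does not
theorem pvStripPunctA_id (l : List Char) (c : Char) (h : l.getLast? = some c)
    (hp : pvIsPunct c = false) : pvStripPunctA l = l := by
  rw [pvStripPunctA_eq]
  have hrev : l.reverse.head? = some c := by rw [List.head?_reverse, h]
  cases hl : l.reverse with
  | nil => rw [hl] at hrev; simp at hrev
  | cons x xs =>
    rw [hl] at hrev
    simp only [List.head?_cons, Option.some.injEq] at hrev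
    subst hrev
    rw [List.dropWhile_cons, hp]
    simp only [Bool.false_eq_true, if_false]
    rw [← hl, List.reverse_reverse]

-- ===== VERDICT (by name: the statement is the Claim_ definition above) =====
theorem preserve_terminal_punctuation_spec : Claim_equal_preserve_terminal_punctuation := by
  intro c s _
  unfold Spec_preserve_terminal_punctuation
  unfold preserve_terminal_punctuation preserve_terminal_punctuation_alt
  simp only [pvContainsPunct]
  by_cases h1 : (s.toList.any pvIsPunct) = true
  case neg => simp [h1]
  simp only [h1, Bool.not_true, Bool.false_eq_true, if_false]
  by_cases h2 : PySem.Chars.rstrip s.toList = [] ∨ PySem.Chars.rstrip c.toList = []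
  · rw [if_pos h2, if_pos h2]
  rw [if_neg h2, if_neg h2]
  rw [not_or] at h2
  obtain ⟨hs, hc⟩ := h2
  obtain ⟨p, hp⟩ := Option.ne_none_iff_exists'.mp (fun h => hs (List.getLast?_eq_none_iff.mp h))
  obtain ⟨q, hq⟩ := Option.ne_none_iff_exists'.mp (fun h => hc (List.getLast?_eq_none_iff.mp h))
  have hterm_s : pvTermChar s.toList = (if pvIsPunct p then [p] else []) := by
    simp [pvTermChar, hp]
  have hterm_c : pvTermChar c.toList = (if pvIsPunct q then [q] else []) := by
    simp [pvTermChar, hq]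
  rw [hterm_s, hterm_c]
  simp only [hp, hq, pv_trailing_eq, pvStripLen_take]
  by_cases hpp : pvIsPunct p = true <;> by_cases hqq : pvIsPunct q = true
  · -- both trimmed texts end in punctuation
    simp only [hpp, hqq]
    by_cases hpq : p = q
    · subst hpq; simp
    · have hne : ([p] : List Char) ≠ [q] := by simp [hpq]
      simp [hne, List.append_assoc]
  · -- source ends in punctuation, corrected does not
    have hid := pvStripPunctA_id _ _ hq (by simpa using hqq)
    simp [hpp, hqq, hid, List.append_assoc]
  · -- corrected ends in punctuation, source does not
    have hne := pvStripPunctA_ne _ _ hq hqq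
    simp [hpp, hqq, hne]
  · simp [hpp, hqq]
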